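-- pv_equiv track=rewrite | github.com/VincentZZZ1023/SciAgentDemo | backend/app/models/schemas.py | _infer_preset_name
-- ===== SOURCE A (Python) =====
-- from enum import Enum
--
-- class AgentId(str, Enum):
--     review = "review"
--     ideation = "ideation"
--     experiment = "experiment"
--
-- def _infer_preset_name(selected_agents: list[AgentId], thinking_mode: str) -> str:
--     enabled = [agent.value for agent in selected_agents]
--     if enabled == [AgentId.review.value]:
--         base = "survey-only"
--     elif enabled == [AgentId.ideation.value]:
--         base = "idea-only"
--     elif enabled == [AgentId.experiment.value]:
--         base = "experiment-only"
--     elif enabled == [AgentId.review.value, AgentId.ideation.value]: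
--         base = "survey-idea"
--     elif enabled == [AgentId.ideation.value, AgentId.experiment.value]:
--         base = "idea-experiment"
--     elif enabled == [AgentId.review.value, AgentId.ideation.value, AgentId.experiment.value]:
--         base = "full-demo"
--     else:
--         base = "custom"
--
--     if thinking_mode in {"deep", "pro"}:
--         return f"{base}-{thinking_mode}"
--     return base
-- ===== SOURCE B (Python) =====
-- # B: recognized presets are exactly the nonempty contiguous runs of the canonical
-- # agent order; detect a run by slice comparison and build the name compositionally
-- # (short names joined with '-', '-only' for singletons, 'full-demo' for the full run).
-- ORDER = ["review", "ideation", "experiment"]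
-- SHORT = {"review": "survey", "ideation": "idea", "experiment": "experiment"}
--
-- def _infer_preset_name(selected_agents, thinking_mode: str) -> str:
--     enabled = [agent.value for agent in selected_agents]
--     n = len(enabled)
--     if n == 3 and enabled == ORDER:
--         base = "full-demo"
--     elif n in (1, 2) and any(enabled == ORDER[i:i + n] for i in range(len(ORDER) - n + 1)):
--         base = SHORT[enabled[0]] + "-only" if n == 1 else "-".join(SHORT[v] for v in enabled)
--     else:
--         base = "custom"
--     return f"{base}-{thinking_mode}" if thinking_mode in {"deep", "pro"} else base
-- ===== Notes on version B (the rewrite author's own statement) =====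
-- stated objective: alternative
-- what changed: Instead of a six-way list-equality chain, B recognizes a preset as a nonempty contiguous run of the canonical agent order (checked by slice comparison over start positions) and builds the name compositionally from per-agent short names ('-only' for singletons, joined with '-' for pairs, 'full-demo' for the whole run).
import Mathlib
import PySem

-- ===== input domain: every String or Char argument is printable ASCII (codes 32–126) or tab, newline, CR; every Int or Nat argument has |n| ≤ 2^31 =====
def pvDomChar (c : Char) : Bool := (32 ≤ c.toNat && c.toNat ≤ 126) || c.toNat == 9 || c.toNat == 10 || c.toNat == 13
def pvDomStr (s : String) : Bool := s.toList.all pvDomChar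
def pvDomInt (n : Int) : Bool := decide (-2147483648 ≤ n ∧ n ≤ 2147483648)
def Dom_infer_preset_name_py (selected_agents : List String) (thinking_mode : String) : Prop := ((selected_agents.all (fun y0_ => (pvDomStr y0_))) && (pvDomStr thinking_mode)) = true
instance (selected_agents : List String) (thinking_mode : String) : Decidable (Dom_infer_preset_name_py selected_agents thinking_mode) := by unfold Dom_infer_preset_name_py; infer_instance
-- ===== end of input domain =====

-- B recognizes presets as contiguous runs of the canonical agent order and names them
-- compositionally, instead of A's six-way list-equality chain. Objective: alternative.

-- ===== PORT A =====
def infer_preset_name_py (selected_agents : List String) (thinking_mode : String) : String :=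
  let enabled := selected_agents.map (fun agent => agent)   -- .value of a str-Enum member is the string itself
  let base :=
    if enabled = ["review"] then "survey-only"
    else if enabled = ["ideation"] then "idea-only"
    else if enabled = ["experiment"] then "experiment-only"
    else if enabled = ["review", "ideation"] then "survey-idea"
    else if enabled = ["ideation", "experiment"] then "idea-experiment"
    else if enabled = ["review", "ideation", "experiment"] then "full-demo"
    else "custom"
  if thinking_mode = "deep" ∨ thinking_mode = "pro" then base ++ "-" ++ thinking_mode
  else base

-- ===== PORT B =====
def pvOrder : List String := ["review", "ideation", "experiment"]

def pvShort : PySem.Dict String String :=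
  ((PySem.Dict.empty.insert "review" "survey").insert "ideation" "idea").insert "experiment" "experiment"

def infer_preset_name_py_alt (selected_agents : List String) (thinking_mode : String) : String :=
  let enabled := selected_agents.map (fun agent => agent)
  let n := enabled.length
  let base :=
    if n = 3 ∧ enabled = pvOrder then "full-demo"
    else if (n = 1 ∨ n = 2) ∧
        (PySem.List.pyRange 0 ((pvOrder.length : Int) - (n : Int) + 1) 1).any
          (fun i => decide (enabled = PySem.List.slice pvOrder (some i) (some (i + (n : Int))))) then
      -- SHORT[...] lookups are only reached after a successful run match, so the key is
      -- always present; getD's default is unreachable (Python would raise KeyError there).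
      if n = 1 then pvShort.getD enabled.headI "" ++ "-only"
      else String.intercalate "-" (enabled.map (fun v => pvShort.getD v ""))
    else "custom"
  if thinking_mode = "deep" ∨ thinking_mode = "pro" then base ++ "-" ++ thinking_mode
  else base

-- ===== PRECONDITION & SPEC =====
-- Pre_: each selected agent is one of the three AgentId members; on any other string Python's
-- `agent.value` raises AttributeError (a plain str is not an AgentId), so A returns nothing there.
def Pre_infer_preset_name_py (selected_agents : List String) (thinking_mode : String) : Prop :=
  ∀ a ∈ selected_agents, a = "review" ∨ a = "ideation" ∨ a = "experiment"
instance (selected_agents : List String) (thinking_mode : String) : Decidable (Pre_infer_preset_name_py selected_agents thinking_mode) := by unfold Pre_infer_preset_name_py; infer_instance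
def pvWitness_infer_preset_name_py : List String × String := (["review", "ideation"], "deep")

def Spec_infer_preset_name_py (selected_agents : List String) (thinking_mode : String) (out : String) : Prop := out = infer_preset_name_py_alt selected_agents thinking_mode
instance (selected_agents : List String) (thinking_mode : String) (out : String) : Decidable (Spec_infer_preset_name_py selected_agents thinking_mode out) := by unfold Spec_infer_preset_name_py; infer_instance

-- ===== CLAIM =====
def Claim_equal_infer_preset_name_py : Prop := ∀ (selected_agents : List String) (thinking_mode : String), Dom_infer_preset_name_py selected_agents thinking_mode → Pre_infer_preset_name_py selected_agents thinking_mode → Spec_infer_preset_name_py selected_agents thinking_mode (infer_preset_name_py selected_agents thinking_mode)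

-- ===== LEMMAS AND PROOFS =====

-- Both sides share the same suffix step, so equality of the two base values suffices.
lemma bases_eq (sa : List String)
    (hpre : ∀ a ∈ sa, a = "review" ∨ a = "ideation" ∨ a = "experiment") (tm : String) :
    infer_preset_name_py sa tm = infer_preset_name_py_alt sa tm := by
  match sa with
  | [] => rfl
  | [a] =>
    rcases hpre a (by simp) with rfl | rfl | rfl <;> rfl
  | [a, b] =>
    rcases hpre a (by simp) with rfl | rfl | rfl <;>
      rcases hpre b (by simp) with rfl | rfl | rfl <;> rfl
  | [a, b, c] =>
    rcases hpre a (by simp) with rfl | rfl | rfl <;>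
      rcases hpre b (by simp) with rfl | rfl | rfl <;>
        rcases hpre c (by simp) with rfl | rfl | rfl <;> rfl
  | a :: b :: c :: d :: rest =>
    -- length ≥ 4: every comparison in A fails and B's length tests fail; both give "custom"
    unfold infer_preset_name_py infer_preset_name_py_alt
    simp only [List.map_id']
    split_ifs <;> simp_all

-- ===== VERDICT =====
theorem infer_preset_name_py_spec : Claim_equal_infer_preset_name_py := by
  intro sa tm _ hpre
  exact bases_eq sa hpre tm
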